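-- pv_equiv track=rewrite | github.com/kyunhong/seat | seat.py | find_full_id_by_name
-- ===== SOURCE A (Python) =====
-- def find_full_id_by_name(target_name, full_student_list):
--     target_name = str(target_name).strip()
--     for student in full_student_list:
--         try:
--             _, name = student.split('.', 1)
--             if name.strip() == target_name:
--                 return student
--         except:
--             continue
--     for student in full_student_list:
--         if target_name in student:
--             return student
--     return None
-- ===== SOURCE B (Python) =====
-- def find_full_id_by_name(target_name, full_student_list):
--     target_name = str(target_name).strip()
--     fallback = None
--     for student in full_student_list:
--         try:
--             _, name = student.split('.', 1)
--             if name.strip() == target_name: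
--                 return student
--         except:
--             pass
--         if fallback is None and target_name in student:
--             fallback = student
--     return fallback
-- ===== Notes on version B (the rewrite author's own statement) =====
-- stated objective: alternative
-- what changed: Replaces A's two sequential priority passes (exact-name scan, then substring scan) with a single traversal that returns the first exact match immediately and remembers the first substring match as a fallback.
import Mathlib
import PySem

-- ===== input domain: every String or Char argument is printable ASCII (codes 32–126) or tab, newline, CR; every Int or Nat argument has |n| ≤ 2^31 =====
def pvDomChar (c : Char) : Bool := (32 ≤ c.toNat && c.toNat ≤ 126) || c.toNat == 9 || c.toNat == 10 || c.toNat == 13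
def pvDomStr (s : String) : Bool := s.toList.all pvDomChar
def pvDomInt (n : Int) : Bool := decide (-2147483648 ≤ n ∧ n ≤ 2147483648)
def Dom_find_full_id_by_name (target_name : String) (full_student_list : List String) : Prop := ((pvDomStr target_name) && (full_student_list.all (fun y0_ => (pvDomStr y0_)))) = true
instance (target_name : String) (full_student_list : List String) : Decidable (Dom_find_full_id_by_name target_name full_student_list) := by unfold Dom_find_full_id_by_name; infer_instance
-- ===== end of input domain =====

-- B: one traversal with a fallback instead of A's two sequential priority passes; objective: alternative decomposition (same cost).

-- ===== PORT A =====
-- first pass: return the first student whose name part (after the first '.') strips to target;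
-- students without a '.' raise ValueError on unpacking, swallowed by the bare except (→ skip)
def pvA_loop1 (t : String) : List String → Option String
  | [] => none
  | s :: rest =>
    match PySem.Str.splitMax? s "." 1 with
    | some [_, name] => if PySem.Str.strip name == t then some s else pvA_loop1 t rest
    | _ => pvA_loop1 t rest

-- second pass: first student containing target as a substring
def pvA_loop2 (t : String) : List String → Option String
  | [] => none
  | s :: rest => if PySem.Str.isIn t s then some s else pvA_loop2 t rest

def find_full_id_by_name (target_name : String) (full_student_list : List String) : Option String :=
  let t := PySem.Str.strip target_name
  match pvA_loop1 t full_student_list with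
  | some s => some s
  | none => pvA_loop2 t full_student_list

-- ===== PORT B =====
-- exact-match test: split on the first '.', strip the name part; no '.' → the swallowed ValueError → false
def pvB_exact (t s : String) : Bool :=
  match PySem.Str.splitMax? s "." 1 with
  | some [_, name] => PySem.Str.strip name == t
  | _ => false

-- single loop: return on first exact match, remember the first substring match as fallback
def pvB_loop (t : String) (fb : Option String) : List String → Option String
  | [] => fb
  | s :: rest =>
    if pvB_exact t s then some s
    else pvB_loop t (if fb.isNone && PySem.Str.isIn t s then some s else fb) rest

def find_full_id_by_name_alt (target_name : String) (full_student_list : List String) : Option String :=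
  pvB_loop (PySem.Str.strip target_name) none full_student_list

-- ===== PRECONDITION & SPEC =====
def Spec_find_full_id_by_name (target_name : String) (full_student_list : List String) (out : Option String) : Prop := out = find_full_id_by_name_alt target_name full_student_list
instance (target_name : String) (full_student_list : List String) (out : Option String) : Decidable (Spec_find_full_id_by_name target_name full_student_list out) := by unfold Spec_find_full_id_by_name; infer_instance

-- ===== CLAIM (what is proved, stated in full; the proofs are below) =====
def Claim_equal_find_full_id_by_name : Prop := ∀ (target_name : String) (full_student_list : List String), Dom_find_full_id_by_name target_name full_student_list → Spec_find_full_id_by_name target_name full_student_list (find_full_id_by_name target_name full_student_list)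

-- ===== LEMMAS AND PROOFS =====

theorem pv_match_if (t : String) (x y : Option String) :
    ∀ r : Option (List String),
    (match r with
      | some [_, name] => if PySem.Str.strip name == t then x else y
      | _ => y) =
      (if (match r with
            | some [_, name] => PySem.Str.strip name == t
            | _ => false) then x else y)
  | none => rfl
  | some [] => rfl
  | some [_] => rfl
  | some [_, name] => by by_cases h : PySem.Str.strip name == t <;> simp [h]
  | some (_ :: _ :: _ :: _) => rfl

theorem pvA_loop1_cons (t s : String) (rest : List String) :
    pvA_loop1 t (s :: rest) = if pvB_exact t s then some s else pvA_loop1 t rest := by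
  simp only [pvA_loop1, pvB_exact]
  exact pv_match_if t (some s) (pvA_loop1 t rest) (PySem.Str.splitMax? s "." 1)

theorem pvB_loop_eq (t : String) (l : List String) : ∀ fb : Option String,
    pvB_loop t fb l =
      match pvA_loop1 t l with
      | some s => some s
      | none => match fb with
        | some f => some f
        | none => pvA_loop2 t l := by
  induction l with
  | nil => intro fb; cases fb <;> rfl
  | cons s rest ih =>
    intro fb
    rw [pvA_loop1_cons]
    simp only [pvB_loop, pvA_loop2]
    by_cases hx : pvB_exact t s
    · simp [hx]
    · simp only [hx, Bool.false_eq_true, ite_false]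
      cases fb with
      | some f => simp [ih]
      | none => rcases hin : PySem.Str.isIn t s with _ | _ <;> simp [ih]

-- ===== VERDICT (by name: the statement is the Claim_ definition above) =====
theorem find_full_id_by_name_spec : Claim_equal_find_full_id_by_name := by
  intro target_name full_student_list _
  unfold Spec_find_full_id_by_name find_full_id_by_name find_full_id_by_name_alt
  rw [pvB_loop_eq]
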